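-- pv_equiv track=rewrite | github.com/sansv8/pytorch-retain | Data/heartFailure.py | map_PID_HF_Date
-- ===== SOURCE A (Python) =====
-- def map_PID_HF_Date(pidAdmMap, admDateMap, mapAdmHf):
--     # Firstly, create two maps
--     # This maps the PID to a list of visits of whether the patients has heart failure or not
--     pidHFsMap = {}
--
--     # This maps the PID to a list of their admissions dates
--     # This is used to make sure the sequence of visits are in the correct order
--     pidAdmDateMap = {}
--
--     # Go through each pid in adm map
--     for pid in pidAdmMap:
--         # Go through each adm id in the list
--         for admID in pidAdmMap[pid]:
--             # Check if pid is in pidHFsMap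
--             # If it is not
--             if pid not in pidHFsMap:
--                 # Start new sequence of visit for paitent
--                 pidHFsMap[pid] = [mapAdmHf[admID]]
--                 pidAdmDateMap[pid] = [admDateMap[admID]]
--             else:
--                 # Add new element to current sequence of visit for the patient
--                 pidHFsMap[pid].append(mapAdmHf[admID])
--                 pidAdmDateMap[pid].append(admDateMap[admID])
--
--         # Sort the sequence of visits for each patient
--         pidHFsMap[pid] = [i for _, i in sorted(zip(pidAdmDateMap[pid], pidHFsMap[pid]))]
--         pidAdmDateMap[pid].sort()
--
--     # Return both maps
--     return pidHFsMap, pidAdmDateMap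
-- ===== SOURCE B (Python) =====
-- def map_PID_HF_Date(pidAdmMap, admDateMap, mapAdmHf):
--     # Online insertion sort: for each patient keep ONE list of (date, hf) pairs
--     # permanently sorted, inserting every new admission into its place as we
--     # scan; no sort() call, no parallel lists, no membership branching.
--     pidHFsMap = {}
--     pidAdmDateMap = {}
--     for pid, admIDs in pidAdmMap.items():
--         seq = []
--         for a in admIDs:
--             pair = (admDateMap[a], mapAdmHf[a])
--             i = 0
--             while i < len(seq) and not pair < seq[i]:
--                 i += 1
--             seq.insert(i, pair)
--         pidHFsMap[pid] = [hf for _, hf in seq]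
--         pidAdmDateMap[pid] = [d for d, _ in seq]
--     return pidHFsMap, pidAdmDateMap
-- ===== Notes on version B (the rewrite author's own statement) =====
-- stated objective: alternative
-- what changed: B never calls sort: per patient it maintains a single permanently-sorted list of (date, hf) pairs by inserting each admission into its sorted position while scanning (online insertion sort), instead of A's first-visit/append branching into two parallel dict-resident lists followed by a zip-sort and a second separate sort.
import Mathlib
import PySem

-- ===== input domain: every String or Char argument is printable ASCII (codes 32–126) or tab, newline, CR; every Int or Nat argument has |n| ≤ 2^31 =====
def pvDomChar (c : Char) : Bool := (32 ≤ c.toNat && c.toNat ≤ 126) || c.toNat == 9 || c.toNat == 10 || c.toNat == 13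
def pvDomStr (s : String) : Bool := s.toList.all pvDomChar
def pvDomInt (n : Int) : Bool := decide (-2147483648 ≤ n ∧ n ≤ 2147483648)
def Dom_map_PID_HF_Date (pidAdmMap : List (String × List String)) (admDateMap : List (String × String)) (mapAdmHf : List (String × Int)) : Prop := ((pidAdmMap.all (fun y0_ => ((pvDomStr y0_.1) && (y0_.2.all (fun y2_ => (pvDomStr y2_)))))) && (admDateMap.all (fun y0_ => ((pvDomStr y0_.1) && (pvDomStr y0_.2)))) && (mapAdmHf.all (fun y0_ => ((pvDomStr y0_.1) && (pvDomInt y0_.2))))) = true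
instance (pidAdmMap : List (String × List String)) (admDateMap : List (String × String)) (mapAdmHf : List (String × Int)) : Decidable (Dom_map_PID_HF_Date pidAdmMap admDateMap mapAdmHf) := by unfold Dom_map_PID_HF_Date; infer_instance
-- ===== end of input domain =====

-- B maintains, per patient, one permanently sorted list of (date, hf) pairs by online
-- insertion while scanning admissions (no sort call), instead of A's branching append into
-- two parallel dict-resident lists followed by two separate sorts.


-- shared lookup helpers: Python's admDateMap[a] / mapAdmHf[a] dict accesses (total under Pre_)
def dLookup (admDateMap : List (String × String)) (a : String) : String :=
  (PySem.Dict.mk admDateMap).getD a ""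
def hLookup (mapAdmHf : List (String × Int)) (a : String) : Int :=
  (PySem.Dict.mk mapAdmHf).getD a 0

-- the pair of dicts (pidHFsMap, pidAdmDateMap) both programs carry
abbrev PidSt := PySem.Dict String (List Int) × PySem.Dict String (List String)

-- ===== PORT A =====
-- inner loop body: 'for admID in pidAdmMap[pid]: if pid not in pidHFsMap: … else: …'
def aStep (admDateMap : List (String × String)) (mapAdmHf : List (String × Int))
    (pid : String) (st : PidSt) (admID : String) : PidSt :=
  if st.1.contains pid = false then
    (st.1.insert pid [hLookup mapAdmHf admID], st.2.insert pid [dLookup admDateMap admID])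
  else
    (st.1.modify pid [] (fun l => l ++ [hLookup mapAdmHf admID]),
     st.2.modify pid [] (fun l => l ++ [dLookup admDateMap admID]))

-- outer loop body: run the inner loop, then re-sort this pid's two lists
def aOuter (admDateMap : List (String × String)) (mapAdmHf : List (String × Int))
    (st : PidSt) (pe : String × List String) : PidSt :=
  let s := pe.2.foldl (aStep admDateMap mapAdmHf pe.1) st
  (s.1.insert pe.1 ((PySem.List.sorted2 ((s.2.getD pe.1 []).zip (s.1.getD pe.1 [])) Prod.fst Prod.snd false).map Prod.snd),
   s.2.insert pe.1 (PySem.List.sorted (s.2.getD pe.1 []) (fun x => x) false))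

def map_PID_HF_Date (pidAdmMap : List (String × List String)) (admDateMap : List (String × String)) (mapAdmHf : List (String × Int)) : (List (String × List Int)) × (List (String × List String)) :=
  let r := pidAdmMap.foldl (aOuter admDateMap mapAdmHf) (PySem.Dict.empty, PySem.Dict.empty)
  (r.1.items, r.2.items)

-- ===== PORT B =====
-- the 'i = 0; while … i += 1; seq.insert(i, pair)' scan: walk the sorted list and place the
-- pair before the first strictly greater element (Python tuple '<' is lexicographic)
def insPair (x : String × Int) : List (String × Int) → List (String × Int)
  | [] => [x]
  | y :: ys => if x.1 < y.1 ∨ (¬ y.1 < x.1 ∧ x.2 < y.2) then x :: y :: ys else y :: insPair x ys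

-- per patient: fold the admissions into one sorted (date, hf) list, then unzip it
def bOuter (admDateMap : List (String × String)) (mapAdmHf : List (String × Int))
    (st : PidSt) (pe : String × List String) : PidSt :=
  let seq := pe.2.foldl (fun acc a => insPair (dLookup admDateMap a, hLookup mapAdmHf a) acc) []
  (st.1.insert pe.1 (seq.map Prod.snd), st.2.insert pe.1 (seq.map Prod.fst))

def map_PID_HF_Date_alt (pidAdmMap : List (String × List String)) (admDateMap : List (String × String)) (mapAdmHf : List (String × Int)) : (List (String × List Int)) × (List (String × List String)) :=
  let r := pidAdmMap.foldl (bOuter admDateMap mapAdmHf) (PySem.Dict.empty, PySem.Dict.empty)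
  (r.1.items, r.2.items)

-- ===== PRECONDITION & SPEC =====
-- Pre_ restricts to genuine dict arguments (no duplicate keys — a Python dict cannot carry
-- them), requires every admission id to be a key of both maps (KeyError otherwise) and every
-- patient's admission list to be nonempty (A raises KeyError reading back a never-created entry).
def Pre_map_PID_HF_Date (pidAdmMap : List (String × List String)) (admDateMap : List (String × String)) (mapAdmHf : List (String × Int)) : Prop :=
  (pidAdmMap.map Prod.fst).Nodup ∧ (admDateMap.map Prod.fst).Nodup ∧ (mapAdmHf.map Prod.fst).Nodup ∧
  ∀ pe ∈ pidAdmMap, pe.2 ≠ [] ∧ ∀ a ∈ pe.2, a ∈ admDateMap.map Prod.fst ∧ a ∈ mapAdmHf.map Prod.fst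
instance (pidAdmMap : List (String × List String)) (admDateMap : List (String × String)) (mapAdmHf : List (String × Int)) : Decidable (Pre_map_PID_HF_Date pidAdmMap admDateMap mapAdmHf) := by unfold Pre_map_PID_HF_Date; infer_instance

def pvWitness_map_PID_HF_Date : (List (String × List String)) × (List (String × String)) × (List (String × Int)) :=
  ([("p", ["a", "b"])], [("a", "2020"), ("b", "2019")], [("a", 1), ("b", 0)])

def Spec_map_PID_HF_Date (pidAdmMap : List (String × List String)) (admDateMap : List (String × String)) (mapAdmHf : List (String × Int)) (out : (List (String × List Int)) × (List (String × List String))) : Prop := out = map_PID_HF_Date_alt pidAdmMap admDateMap mapAdmHf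
instance (pidAdmMap : List (String × List String)) (admDateMap : List (String × String)) (mapAdmHf : List (String × Int)) (out : (List (String × List Int)) × (List (String × List String))) : Decidable (Spec_map_PID_HF_Date pidAdmMap admDateMap mapAdmHf out) := by unfold Spec_map_PID_HF_Date; infer_instance

-- ===== CLAIM (what is proved, stated in full; the proofs are below) =====
def Claim_equal_map_PID_HF_Date : Prop := ∀ (pidAdmMap : List (String × List String)) (admDateMap : List (String × String)) (mapAdmHf : List (String × Int)), Dom_map_PID_HF_Date pidAdmMap admDateMap mapAdmHf → Pre_map_PID_HF_Date pidAdmMap admDateMap mapAdmHf → Spec_map_PID_HF_Date pidAdmMap admDateMap mapAdmHf (map_PID_HF_Date pidAdmMap admDateMap mapAdmHf)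

-- ===== LEMMAS AND PROOFS =====

-- dict facts for an entry sitting last, behind keys all different from pid
theorem dcontains_last {ν : Type} (H : List (String × ν)) (pid : String) (u : ν) :
    (PySem.Dict.mk (H ++ [(pid, u)])).contains pid = true := by
  simp [PySem.Dict.contains]

theorem dcontains_fresh {ν : Type} (H : List (String × ν)) (pid : String)
    (h : ∀ p ∈ H, p.1 ≠ pid) : (PySem.Dict.mk H).contains pid = false := by
  simp only [PySem.Dict.contains, List.any_eq_false]
  intro p hp
  simpa using h p hp

theorem dgetD_fresh {ν : Type} (H : List (String × ν)) (pid : String) (d : ν)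
    (h : ∀ p ∈ H, p.1 ≠ pid) : (PySem.Dict.mk H).getD pid d = d := by
  simp only [PySem.Dict.getD, PySem.Dict.get?]
  rw [List.find?_eq_none.2 (by intro p hp; simpa using h p hp)]
  rfl

theorem dgetD_last {ν : Type} (H : List (String × ν)) (pid : String) (u d : ν)
    (h : ∀ p ∈ H, p.1 ≠ pid) : (PySem.Dict.mk (H ++ [(pid, u)])).getD pid d = u := by
  simp only [PySem.Dict.getD, PySem.Dict.get?]
  rw [List.find?_append, List.find?_eq_none.2 (by intro p hp; simpa using h p hp)]
  simp

theorem dinsert_fresh {ν : Type} (H : List (String × ν)) (pid : String) (v : ν)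
    (h : ∀ p ∈ H, p.1 ≠ pid) :
    (PySem.Dict.mk H).insert pid v = PySem.Dict.mk (H ++ [(pid, v)]) := by
  simp [PySem.Dict.insert, dcontains_fresh H pid h]

theorem dinsert_last {ν : Type} (H : List (String × ν)) (pid : String) (u v : ν)
    (h : ∀ p ∈ H, p.1 ≠ pid) :
    (PySem.Dict.mk (H ++ [(pid, u)])).insert pid v = PySem.Dict.mk (H ++ [(pid, v)]) := by
  simp only [PySem.Dict.insert, dcontains_last, if_pos]
  congr 1
  rw [List.map_append]
  congr 1
  · conv_rhs => rw [← List.map_id H]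
    exact List.map_congr_left (fun p hp => by simp [h p hp])
  · simp

theorem dmodify_last {ν : Type} (H : List (String × ν)) (pid : String) (u d : ν) (f : ν → ν)
    (h : ∀ p ∈ H, p.1 ≠ pid) :
    (PySem.Dict.mk (H ++ [(pid, u)])).modify pid d f = PySem.Dict.mk (H ++ [(pid, f u)]) := by
  show (PySem.Dict.mk (H ++ [(pid, u)])).insert pid
      (f ((PySem.Dict.mk (H ++ [(pid, u)])).getD pid d)) = _
  rw [dgetD_last H pid u d h, dinsert_last H pid u (f u) h]

-- A's inner loop, once the pid's entry exists at the back of both dicts, only appends to it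
theorem aInnerRun (dm : List (String × String)) (hm : List (String × Int)) (pid : String)
    (adms : List String) :
    ∀ (H : List (String × List Int)) (D : List (String × List String)) (u : List Int) (w : List String),
      (∀ p ∈ H, p.1 ≠ pid) → (∀ p ∈ D, p.1 ≠ pid) →
      adms.foldl (aStep dm hm pid) (PySem.Dict.mk (H ++ [(pid, u)]), PySem.Dict.mk (D ++ [(pid, w)]))
        = (PySem.Dict.mk (H ++ [(pid, u ++ adms.map (hLookup hm))]),
           PySem.Dict.mk (D ++ [(pid, w ++ adms.map (dLookup dm))])) := by
  induction adms with
  | nil => intro H D u w hH hD; simp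
  | cons a rest ih =>
    intro H D u w hH hD
    rw [List.foldl_cons]
    have hstep : aStep dm hm pid (PySem.Dict.mk (H ++ [(pid, u)]), PySem.Dict.mk (D ++ [(pid, w)])) a
        = (PySem.Dict.mk (H ++ [(pid, u ++ [hLookup hm a])]), PySem.Dict.mk (D ++ [(pid, w ++ [dLookup dm a])])) := by
      rw [aStep]
      rw [if_neg (by simp [dcontains_last H pid u])]
      rw [dmodify_last H pid u [] _ hH, dmodify_last D pid w [] _ hD]
    rw [hstep, ih H D _ _ hH hD]
    simp

-- one outer iteration of A, on a fresh pid
theorem aOuterStep (dm : List (String × String)) (hm : List (String × Int))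
    (H : List (String × List Int)) (D : List (String × List String)) (pid : String)
    (adms : List String) (hH : ∀ p ∈ H, p.1 ≠ pid) (hD : ∀ p ∈ D, p.1 ≠ pid) :
    aOuter dm hm (PySem.Dict.mk H, PySem.Dict.mk D) (pid, adms)
      = (PySem.Dict.mk (H ++ [(pid, (PySem.List.sorted2 ((adms.map (dLookup dm)).zip (adms.map (hLookup hm))) Prod.fst Prod.snd false).map Prod.snd)]),
         PySem.Dict.mk (D ++ [(pid, PySem.List.sorted (adms.map (dLookup dm)) (fun x => x) false)])) := by
  cases adms with
  | nil =>
    show (_, _) = _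
    rw [List.foldl_nil]
    simp only [dgetD_fresh H pid [] hH, dgetD_fresh D pid [] hD]
    rw [dinsert_fresh H pid _ hH, dinsert_fresh D pid _ hD]
    simp
  | cons a rest =>
    show (_, _) = _
    rw [List.foldl_cons]
    have hstep : aStep dm hm pid (PySem.Dict.mk H, PySem.Dict.mk D) a
        = (PySem.Dict.mk (H ++ [(pid, [hLookup hm a])]), PySem.Dict.mk (D ++ [(pid, [dLookup dm a])])) := by
      rw [aStep]
      rw [if_pos (by simp [dcontains_fresh H pid hH])]
      rw [dinsert_fresh H pid _ hH, dinsert_fresh D pid _ hD]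
    rw [hstep, aInnerRun dm hm pid rest H D _ _ hH hD]
    simp only [dgetD_last H pid _ [] hH, dgetD_last D pid _ [] hD]
    rw [dinsert_last H pid _ _ hH, dinsert_last D pid _ _ hD]
    simp

-- B's hand-written insertion is PySem's insertBy with the lexicographic-tuple predicate
theorem insPair_eq_insertBy (x : String × Int) (l : List (String × Int)) :
    insPair x l = PySem.List.insertBy (fun a b => decide (a.1 < b.1) || (!decide (b.1 < a.1) && decide (a.2 < b.2))) x l := by
  induction l with
  | nil => rfl
  | cons y ys ih =>
    rw [insPair, PySem.List.insertBy]
    by_cases h : x.1 < y.1 ∨ (¬ y.1 < x.1 ∧ x.2 < y.2)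
    · rw [if_pos h, if_pos (by simpa [Bool.or_eq_true, Bool.and_eq_true, decide_eq_true_iff] using h)]
    · rw [if_neg h, if_neg (by simpa [Bool.or_eq_true, Bool.and_eq_true, decide_eq_true_iff] using h), ih]


-- B's insertion fold over the admissions IS the tuple-sort of the looked-up pairs
theorem bSeq_eq_sorted2 (dm : List (String × String)) (hm : List (String × Int)) (adms : List String) :
    adms.foldl (fun acc a => insPair (dLookup dm a, hLookup hm a) acc) []
      = PySem.List.sorted2 (adms.map (fun a => (dLookup dm a, hLookup hm a))) Prod.fst Prod.snd false := by
  show _ = (adms.map (fun a => (dLookup dm a, hLookup hm a))).foldl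
      (fun acc x => PySem.List.insertBy (fun a b => decide (a.1 < b.1) || (!decide (b.1 < a.1) && decide (a.2 < b.2))) x acc) []
  rw [List.foldl_map]
  generalize [] = acc
  induction adms generalizing acc with
  | nil => rfl
  | cons a rest ih => rw [List.foldl_cons, List.foldl_cons, insPair_eq_insertBy]; exact ih _

theorem ltp_le {a b : String × Int}
    (h : (decide (a.1 < b.1) || (!decide (b.1 < a.1) && decide (a.2 < b.2))) = true) : a.1 ≤ b.1 := by
  rcases Bool.or_eq_true_iff.1 h with h1 | h2
  · exact le_of_lt (of_decide_eq_true h1)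
  · simp only [Bool.and_eq_true, Bool.not_eq_true', decide_eq_false_iff_not] at h2
    exact le_of_not_gt h2.1

theorem ltp_le' {a b : String × Int}
    (h : (decide (a.1 < b.1) || (!decide (b.1 < a.1) && decide (a.2 < b.2))) = false) : b.1 ≤ a.1 := by
  rcases Bool.or_eq_false_iff.1 h with ⟨h1, _⟩
  exact le_of_not_gt (by simpa using h1)

theorem insertBy_pairwise_fst (x : String × Int) :
    ∀ (ys : List (String × Int)),
      ys.Pairwise (fun a b => a.1 ≤ b.1) →
      (PySem.List.insertBy (fun a b => decide (a.1 < b.1) || (!decide (b.1 < a.1) && decide (a.2 < b.2))) x ys).Pairwise (fun a b => a.1 ≤ b.1)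
  | [], _ => by simp [PySem.List.insertBy]
  | y :: ys, h => by
    rw [List.pairwise_cons] at h
    by_cases hb : (decide (x.1 < y.1) || (!decide (y.1 < x.1) && decide (x.2 < y.2))) = true
    · rw [PySem.List.insertBy, if_pos hb]
      refine List.pairwise_cons.2 ⟨?_, List.pairwise_cons.2 h⟩
      intro z hz
      rcases List.mem_cons.1 hz with rfl | hz
      · exact ltp_le hb
      · exact le_trans (ltp_le hb) (h.1 z hz)
    · rw [PySem.List.insertBy, if_neg hb]
      refine List.pairwise_cons.2 ⟨?_, insertBy_pairwise_fst x ys h.2⟩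
      intro z hz
      rcases (PySem.List.mem_insertBy _ _ _ _).1 hz with rfl | hz
      · exact ltp_le' (by simpa using hb)
      · exact h.1 z hz

theorem foldl_insertBy_pairwise_fst (l : List (String × Int)) :
    ∀ (acc : List (String × Int)), acc.Pairwise (fun a b => a.1 ≤ b.1) →
      (l.foldl (fun acc x => PySem.List.insertBy (fun a b => decide (a.1 < b.1) || (!decide (b.1 < a.1) && decide (a.2 < b.2))) x acc) acc).Pairwise (fun a b => a.1 ≤ b.1) := by
  induction l with
  | nil => intro acc h; simpa using h
  | cons x xs ih => intro acc h; exact ih _ (insertBy_pairwise_fst x acc h)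

theorem sorted2_pairwise_fst (l : List (String × Int)) :
    (PySem.List.sorted2 l Prod.fst Prod.snd false).Pairwise (fun a b => a.1 ≤ b.1) :=
  foldl_insertBy_pairwise_fst l [] (by simp)

-- sorting the dates alone agrees with taking the dates of the tuple-sorted pairs
theorem sorted_fst_eq (l : List (String × Int)) :
    PySem.List.sorted (l.map Prod.fst) (fun x => x) false
      = (PySem.List.sorted2 l Prod.fst Prod.snd false).map Prod.fst := by
  apply PySem.List.sorted_id_eq_of_perm_of_pairwise
  · exact (PySem.List.sorted2_perm l Prod.fst Prod.snd false).map Prod.fst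
  · exact List.Pairwise.map Prod.fst (fun a b h => h) (sorted2_pairwise_fst l)

-- the per-patient values of the two programs coincide
theorem valuesAgree (dm : List (String × String)) (hm : List (String × Int)) (adms : List String) :
    ((PySem.List.sorted2 ((adms.map (dLookup dm)).zip (adms.map (hLookup hm))) Prod.fst Prod.snd false).map Prod.snd
       = (PySem.List.sorted2 (adms.map (fun a => (dLookup dm a, hLookup hm a))) Prod.fst Prod.snd false).map Prod.snd)
    ∧ (PySem.List.sorted (adms.map (dLookup dm)) (fun x => x) false
       = (PySem.List.sorted2 (adms.map (fun a => (dLookup dm a, hLookup hm a))) Prod.fst Prod.snd false).map Prod.fst) := by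
  rw [List.zip_map']
  refine ⟨rfl, ?_⟩
  have := sorted_fst_eq (adms.map (fun a => (dLookup dm a, hLookup hm a)))
  rw [List.map_map] at this
  exact this

-- both folds, run over a list of pids fresh for the accumulated dicts, just append entries
theorem aRun (dm : List (String × String)) (hm : List (String × Int)) :
    ∀ (l : List (String × List String)) (H : List (String × List Int)) (D : List (String × List String)),
      (l.map Prod.fst).Nodup →
      (∀ pe ∈ l, (∀ p ∈ H, p.1 ≠ pe.1) ∧ (∀ p ∈ D, p.1 ≠ pe.1)) →
      l.foldl (aOuter dm hm) (PySem.Dict.mk H, PySem.Dict.mk D)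
        = (PySem.Dict.mk (H ++ l.map (fun pe => (pe.1, (PySem.List.sorted2 ((pe.2.map (dLookup dm)).zip (pe.2.map (hLookup hm))) Prod.fst Prod.snd false).map Prod.snd))),
           PySem.Dict.mk (D ++ l.map (fun pe => (pe.1, PySem.List.sorted (pe.2.map (dLookup dm)) (fun x => x) false)))) := by
  intro l
  induction l with
  | nil => intro H D _ _; simp
  | cons pe rest ih =>
    intro H D hnd hfresh
    obtain ⟨pid, adms⟩ := pe
    rw [List.foldl_cons,
      aOuterStep dm hm H D pid adms (hfresh (pid, adms) (List.mem_cons_self)).1 (hfresh (pid, adms) (List.mem_cons_self)).2]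
    rw [List.map_cons, List.nodup_cons] at hnd
    rw [ih _ _ hnd.2 ?_]
    · simp
    · intro pe' hpe'
      have hne : pe'.1 ≠ pid := by
        intro hEq
        exact hnd.1 (hEq ▸ (List.mem_map.2 ⟨pe', hpe', rfl⟩))
      constructor
      · intro p hp
        rcases List.mem_append.1 hp with hp | hp
        · exact (hfresh pe' (List.mem_cons_of_mem _ hpe')).1 p hp
        · simp only [List.mem_singleton] at hp
          rw [hp]
          exact fun hEq => hne hEq.symm
      · intro p hp
        rcases List.mem_append.1 hp with hp | hp
        · exact (hfresh pe' (List.mem_cons_of_mem _ hpe')).2 p hp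
        · simp only [List.mem_singleton] at hp
          rw [hp]
          exact fun hEq => hne hEq.symm

theorem bRun (dm : List (String × String)) (hm : List (String × Int)) :
    ∀ (l : List (String × List String)) (H : List (String × List Int)) (D : List (String × List String)),
      (l.map Prod.fst).Nodup →
      (∀ pe ∈ l, (∀ p ∈ H, p.1 ≠ pe.1) ∧ (∀ p ∈ D, p.1 ≠ pe.1)) →
      l.foldl (bOuter dm hm) (PySem.Dict.mk H, PySem.Dict.mk D)
        = (PySem.Dict.mk (H ++ l.map (fun pe => (pe.1, (PySem.List.sorted2 (pe.2.map (fun a => (dLookup dm a, hLookup hm a))) Prod.fst Prod.snd false).map Prod.snd))),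
           PySem.Dict.mk (D ++ l.map (fun pe => (pe.1, (PySem.List.sorted2 (pe.2.map (fun a => (dLookup dm a, hLookup hm a))) Prod.fst Prod.snd false).map Prod.fst)))) := by
  intro l
  induction l with
  | nil => intro H D _ _; simp
  | cons pe rest ih =>
    intro H D hnd hfresh
    obtain ⟨pid, adms⟩ := pe
    rw [List.foldl_cons]
    have hstep : bOuter dm hm (PySem.Dict.mk H, PySem.Dict.mk D) (pid, adms)
        = (PySem.Dict.mk (H ++ [(pid, (PySem.List.sorted2 (adms.map (fun a => (dLookup dm a, hLookup hm a))) Prod.fst Prod.snd false).map Prod.snd)]),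
           PySem.Dict.mk (D ++ [(pid, (PySem.List.sorted2 (adms.map (fun a => (dLookup dm a, hLookup hm a))) Prod.fst Prod.snd false).map Prod.fst)])) := by
      rw [bOuter]
      rw [bSeq_eq_sorted2 dm hm adms]
      rw [dinsert_fresh H pid _ (hfresh (pid, adms) (List.mem_cons_self)).1,
          dinsert_fresh D pid _ (hfresh (pid, adms) (List.mem_cons_self)).2]
    rw [hstep]
    rw [List.map_cons, List.nodup_cons] at hnd
    rw [ih _ _ hnd.2 ?_]
    · simp
    · intro pe' hpe'
      have hne : pe'.1 ≠ pid := by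
        intro hEq
        exact hnd.1 (hEq ▸ (List.mem_map.2 ⟨pe', hpe', rfl⟩))
      constructor
      · intro p hp
        rcases List.mem_append.1 hp with hp | hp
        · exact (hfresh pe' (List.mem_cons_of_mem _ hpe')).1 p hp
        · simp only [List.mem_singleton] at hp
          rw [hp]
          exact fun hEq => hne hEq.symm
      · intro p hp
        rcases List.mem_append.1 hp with hp | hp
        · exact (hfresh pe' (List.mem_cons_of_mem _ hpe')).2 p hp
        · simp only [List.mem_singleton] at hp
          rw [hp]
          exact fun hEq => hne hEq.symm

-- ===== VERDICT (by name: the statement is the Claim_ definition above) =====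
theorem map_PID_HF_Date_spec : Claim_equal_map_PID_HF_Date := by
  intro pidAdmMap admDateMap mapAdmHf _ hpre
  unfold Spec_map_PID_HF_Date map_PID_HF_Date map_PID_HF_Date_alt
  rw [show (PySem.Dict.empty, PySem.Dict.empty) = ((PySem.Dict.mk [] : PySem.Dict String (List Int)), (PySem.Dict.mk [] : PySem.Dict String (List String))) from rfl]
  rw [aRun admDateMap mapAdmHf pidAdmMap [] [] hpre.1 (by simp),
      bRun admDateMap mapAdmHf pidAdmMap [] [] hpre.1 (by simp)]
  simp only [List.nil_append, Prod.mk.injEq]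
  constructor <;>
  · apply List.map_congr_left
    intro pe _
    have h := valuesAgree admDateMap mapAdmHf pe.2
    simp [h.1, h.2]
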